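-- pv_equiv track=rewrite | github.com/ivonagrbesa/rosalind-pmfst | BA6H.py | ColoredEdges
-- ===== SOURCE A (Python) =====
-- def ChromosomeToCycle(chromosome):
--   cycle=[]
--   for el in chromosome:
--     if el>0:
--       cycle.append(2*el-1) #tail
--       cycle.append(2*el) #head
--     else:
--       cycle.append(-2*el) #head
--       cycle.append(-2*el-1) #tail
--   return cycle
--
-- def ColoredEdges(P):
--   edges=[]
--   for kromosom in P:
--     ciklus=ChromosomeToCycle(kromosom) #svaku perm pretvorimo u ciklus
--     for i in range(1, len(ciklus),2):
--       if i!=len(ciklus)-1: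
--         edges.append((ciklus[i], ciklus[i+1]))
--       else:
--         edges.append((ciklus[i], ciklus[0]))
--
--   return edges
-- ===== SOURCE B (Python) =====
-- def ColoredEdges(P):
--   edges = []
--   for chromosome in P:
--     n = len(chromosome)
--     for k in range(n):
--       a = chromosome[k]
--       b = chromosome[(k + 1) % n]
--       edges.append((2 * a if a > 0 else -2 * a - 1,
--                     2 * b - 1 if b > 0 else -2 * b))
--   return edges
-- ===== Notes on version B (the rewrite author's own statement) =====
-- stated objective: simpler
-- what changed: Drops ChromosomeToCycle and its intermediate doubled node list: B emits each colored edge directly from cyclically adjacent genes via (k+1) % n wraparound and inline node-number formulas.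
import Mathlib
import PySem

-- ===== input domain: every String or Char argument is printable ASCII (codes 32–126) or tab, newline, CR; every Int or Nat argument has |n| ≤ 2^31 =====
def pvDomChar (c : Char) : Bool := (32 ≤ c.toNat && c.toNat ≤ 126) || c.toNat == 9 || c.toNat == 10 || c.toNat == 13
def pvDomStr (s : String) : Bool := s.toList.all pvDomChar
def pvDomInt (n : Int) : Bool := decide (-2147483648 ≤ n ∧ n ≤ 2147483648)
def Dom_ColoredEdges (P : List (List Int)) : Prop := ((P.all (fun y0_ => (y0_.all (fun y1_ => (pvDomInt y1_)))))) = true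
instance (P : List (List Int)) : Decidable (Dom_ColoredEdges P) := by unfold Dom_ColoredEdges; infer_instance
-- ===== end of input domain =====

-- B computes each colored edge directly from cyclically adjacent genes ((k+1) % n wraparound),
-- dropping the intermediate doubled "cycle" list and its odd-index rescan (objective: simpler).

-- ===== PORT A =====
-- literal port of ChromosomeToCycle: a foldl appending the two node numbers of each gene
def pvChromosomeToCycle (chromosome : List Int) : List Int :=
  chromosome.foldl (fun cycle el =>
    if el > 0 then (cycle ++ [2 * el - 1]) ++ [2 * el]
    else (cycle ++ [-2 * el]) ++ [-2 * el - 1]) []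

def ColoredEdges (P : List (List Int)) : List (Int × Int) :=
  P.foldl (fun edges kromosom =>
    (PySem.List.pyRange 1 ((pvChromosomeToCycle kromosom).length : Int) 2).foldl (fun e i =>
      if i ≠ ((pvChromosomeToCycle kromosom).length : Int) - 1 then
        e ++ [(PySem.List.pyGetD (pvChromosomeToCycle kromosom) i 0,
               PySem.List.pyGetD (pvChromosomeToCycle kromosom) (i + 1) 0)]
      else
        e ++ [(PySem.List.pyGetD (pvChromosomeToCycle kromosom) i 0,
               PySem.List.pyGetD (pvChromosomeToCycle kromosom) 0 0)]) edges) []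

-- ===== PORT B =====
def ColoredEdges_alt (P : List (List Int)) : List (Int × Int) :=
  P.foldl (fun edges chromosome =>
    (PySem.List.pyRange 0 (chromosome.length : Int) 1).foldl (fun e k =>
      e ++ [((fun a => if a > 0 then 2 * a else -2 * a - 1)
               (PySem.List.pyGetD chromosome k 0),
             (fun b => if b > 0 then 2 * b - 1 else -2 * b)
               (PySem.List.pyGetD chromosome (PySem.Int.mod (k + 1) (chromosome.length : Int)) 0))])
      edges) []

-- ===== PRECONDITION & SPEC =====
def Spec_ColoredEdges (P : List (List Int)) (out : List (Int × Int)) : Prop := out = ColoredEdges_alt P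
instance (P : List (List Int)) (out : List (Int × Int)) : Decidable (Spec_ColoredEdges P out) := by unfold Spec_ColoredEdges; infer_instance

-- ===== CLAIM (what is proved, stated in full; the proofs are below) =====
def Claim_equal_ColoredEdges : Prop := ∀ (P : List (List Int)), Dom_ColoredEdges P → Spec_ColoredEdges P (ColoredEdges P)

-- ===== LEMMAS AND PROOFS =====

-- the first ("tail") and second ("head") node number of a gene, as A lays them out in the cycle
def pvFst (el : Int) : Int := if el > 0 then 2 * el - 1 else -2 * el
def pvSnd (el : Int) : Int := if el > 0 then 2 * el else -2 * el - 1

lemma cycle_eq_flatMap (k : List Int) :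
    pvChromosomeToCycle k = k.flatMap (fun el => [pvFst el, pvSnd el]) := by
  unfold pvChromosomeToCycle
  have h : (fun (cycle : List Int) el =>
      if el > 0 then (cycle ++ [2 * el - 1]) ++ [2 * el]
      else (cycle ++ [-2 * el]) ++ [-2 * el - 1])
      = fun cycle el => cycle ++ [pvFst el, pvSnd el] := by
    funext cycle el
    by_cases h : el > 0 <;> simp [pvFst, pvSnd, h]
  rw [h, PySem.List.foldl_append_eq_flatMap]
  simp

lemma length_cycle (k : List Int) :
    (k.flatMap (fun el => [pvFst el, pvSnd el])).length = 2 * k.length := by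
  induction k with
  | nil => simp
  | cons x xs ih => simp [ih]; omega

lemma cycle_getD_even (k : List Int) (j : Nat) (hj : j < k.length) :
    (k.flatMap (fun el => [pvFst el, pvSnd el])).getD (2 * j) 0 = pvFst (k.getD j 0) := by
  induction k generalizing j with
  | nil => simp at hj
  | cons x xs ih =>
    cases j with
    | zero => simp
    | succ j =>
      have h2 : 2 * (j + 1) = (2 * j) + 1 + 1 := by omega
      rw [h2]
      simpa using ih j (by simpa using hj)

lemma cycle_getD_odd (k : List Int) (j : Nat) (hj : j < k.length) :
    (k.flatMap (fun el => [pvFst el, pvSnd el])).getD (2 * j + 1) 0 = pvSnd (k.getD j 0) := by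
  induction k generalizing j with
  | nil => simp at hj
  | cons x xs ih =>
    cases j with
    | zero => simp
    | succ j =>
      have h2 : 2 * (j + 1) + 1 = (2 * j + 1) + 1 + 1 := by omega
      rw [h2]
      simpa using ih j (by simpa using hj)

-- the per-chromosome edge lists of the two programs coincide
lemma inner_eq (c : List Int) :
    (PySem.List.pyRange 1 ((pvChromosomeToCycle c).length : Int) 2).map (fun i =>
      if i ≠ ((pvChromosomeToCycle c).length : Int) - 1 then
        (PySem.List.pyGetD (pvChromosomeToCycle c) i 0,
         PySem.List.pyGetD (pvChromosomeToCycle c) (i + 1) 0)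
      else
        (PySem.List.pyGetD (pvChromosomeToCycle c) i 0,
         PySem.List.pyGetD (pvChromosomeToCycle c) 0 0))
    = (PySem.List.pyRange 0 (c.length : Int) 1).map (fun k =>
        ((fun a => if a > 0 then 2 * a else -2 * a - 1) (PySem.List.pyGetD c k 0),
         (fun b => if b > 0 then 2 * b - 1 else -2 * b)
           (PySem.List.pyGetD c (PySem.Int.mod (k + 1) (c.length : Int)) 0))) := by
  rw [cycle_eq_flatMap]
  have hlen := length_cycle c
  rw [hlen]
  rw [PySem.List.pyRange_of_pos _ _ (by norm_num : (0:Int) < 2),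
      PySem.List.pyRange_zero_nat]
  by_cases hn0 : c.length = 0
  · obtain rfl := List.length_eq_zero_iff.mp hn0
    simp
  · have hpos : 0 < c.length := Nat.pos_of_ne_zero hn0
    push_cast
    have hcount : (if (1:Int) < 2 * (c.length : Int) then
        ((2 * (c.length : Int) - 1 + 2 - 1) / 2).toNat else 0) = c.length := by
      rw [if_pos (by exact_mod_cast (by omega : (1:Int) < 2 * (c.length : Int)))]
      omega
    rw [hcount]
    rw [List.map_map, List.map_map]
    apply List.map_congr_left
    intro j hj
    rw [List.mem_range] at hj
    -- translate the Int indices of A's side into Nat ones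
    have hA1 : (1 : Int) + 2 * j = ((2 * j + 1 : Nat) : Int) := by push_cast; ring
    by_cases hlast : j = c.length - 1
    · -- last edge: wraps to index 0 on both sides
      have hcond : ¬ ((1 : Int) + 2 * j ≠ 2 * (c.length : Int) - 1) := by
        subst hlast; omega
      simp only [Function.comp_apply, if_neg hcond]
      rw [hA1, PySem.List.pyGetD_natCast, PySem.List.pyGetD_natCast]
      rw [cycle_getD_odd c j (by omega)]
      have hmod : PySem.Int.mod ((j : Int) + 1) (c.length : Int) = 0 := by
        rw [PySem.Int.mod_eq_emod_of_pos (by exact_mod_cast hpos)]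
        have h1 : ((j : Int) + 1) = (c.length : Int) := by omega
        rw [h1]; simp
      rw [hmod]
      obtain ⟨x, xs, rfl⟩ := List.exists_cons_of_ne_nil (List.ne_nil_of_length_pos hpos)
      simp [pvFst, pvSnd, PySem.List.pyGetD_zero_cons]
    · -- interior edge: consecutive genes j and j+1
      have hcond : ((1 : Int) + 2 * j ≠ 2 * (c.length : Int) - 1) := by
        intro h; apply hlast; omega
      simp only [Function.comp_apply, if_pos hcond]
      have hA2 : ((2 * j + 1 : Nat) : Int) + 1 = ((2 * (j + 1) : Nat) : Int) := by push_cast; ring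
      rw [hA1, hA2, PySem.List.pyGetD_natCast, PySem.List.pyGetD_natCast]
      rw [cycle_getD_odd c j (by omega), cycle_getD_even c (j + 1) (by omega)]
      have hmod : PySem.Int.mod ((j : Int) + 1) (c.length : Int) = ((j + 1 : Nat) : Int) := by
        rw [PySem.Int.mod_eq_emod_of_pos (by exact_mod_cast hpos)]
        rw [Int.emod_eq_of_lt (by omega) (by omega)]
        omega
      rw [hmod, PySem.List.pyGetD_natCast, PySem.List.pyGetD_natCast]
      simp [pvFst, pvSnd]

-- ===== VERDICT (by name: the statement is the Claim_ definition above) =====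
theorem ColoredEdges_spec : Claim_equal_ColoredEdges := by
  intro P _
  unfold Spec_ColoredEdges ColoredEdges ColoredEdges_alt
  congr 1
  funext edges c
  have hA : (fun (e : List (Int × Int)) (i : Int) =>
      if i ≠ ((pvChromosomeToCycle c).length : Int) - 1 then
        e ++ [(PySem.List.pyGetD (pvChromosomeToCycle c) i 0,
               PySem.List.pyGetD (pvChromosomeToCycle c) (i + 1) 0)]
      else
        e ++ [(PySem.List.pyGetD (pvChromosomeToCycle c) i 0,
               PySem.List.pyGetD (pvChromosomeToCycle c) 0 0)])
      = fun e i => e ++ [if i ≠ ((pvChromosomeToCycle c).length : Int) - 1 then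
            (PySem.List.pyGetD (pvChromosomeToCycle c) i 0,
             PySem.List.pyGetD (pvChromosomeToCycle c) (i + 1) 0)
          else
            (PySem.List.pyGetD (pvChromosomeToCycle c) i 0,
             PySem.List.pyGetD (pvChromosomeToCycle c) 0 0)] := by
    funext e i
    by_cases h : i = ((pvChromosomeToCycle c).length : Int) - 1 <;> simp [h]
  rw [hA, PySem.List.foldl_append_singleton_eq_map, PySem.List.foldl_append_singleton_eq_map]
  rw [inner_eq c]
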